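/- GENERATED by tools/from_farm_form.py from prooffarm-gif/accepted/DGifCloseFile.4/Proof.lean (a worked proof of the farm's unit `DGifCloseFile.4`,
   accepted by the verdict) — do not edit. -/
import Gif.Spec.Units.DGifCloseFile_4
import Gif.Spec.AllSegs
import Gif.Spec.Proved.DGifCloseFile_4_Lemmas

open X86 X86.User Asan ProgX.Base ProgX.Base.Spec Gif.Spec

set_option maxRecDepth 4000
set_option maxHeartbeats 4000000

/-!
  Segment 4 of `DGifCloseFile` (109D06H … 109D13H, 3 instructions; dgif_lib.c:705):
  `GifFreeExtensions(&GifFile->ExtensionBlockCount, &GifFile->ExtensionBlocks)`, unconditionally (also for the empty list).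

      CUT 109D06H (`Closing … (noSaved F)`) ─ lea rsi,[rbx+0x58] ─ lea rdi,[rbx+0x50] ─ call GifFreeExtensions ─ CUT 109D13H (`Closing … (bare F)`)

  THE BLOCKS, in order: the carried entry and the present state · where gif is · the walk to the call · the callee's precondition
  (`HeapPre.at_push`; `ExtCells`: the two cells inside gif, the list's shape through the pushed return address, what is owned) ·
  behind the call: the callee's post taken apart, the stack slots through its `Returned.same` (`u_frame`), the shape and the measure
  through its FINE footprint (`seg4_shape` of Lemmas.lean: every window is a cell or a gap of the heap), what is left owned
  (`seg4_owns_bare`) · the assertion at the cut 109D13H for the heap `Hc.releaseAll (the bases of the list's objects)`.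
-/

/-- Segment 4 of `DGifCloseFile`: from `Closing` at 109D06H for the forest without colour maps and saved images to `Closing` at
109D13H for the forest of gif and the private object alone, for the heap with every object of the pending list freed. -/
theorem Gif.Spec.Proved.DGifCloseFile_4_ok : Gif.Spec.DGifCloseFile_4.Statement := by
  intro Lay hLay μ hμ u₀ hcode h_GifFreeExtensions H rest frames F R Hc e ret v hat
  -- THE CARRIED ENTRY (facts about `e`) and the present state `v` under the names the walker reads
  obtain ⟨hA, hshape, howns⟩ := hat
  have he := hA.entry
  v_entry he
  obtain ⟨henv, hrdi, herr⟩ := hA.pre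
  have w_rip := hA.rip
  have c_rsp : v.reg .rsp = e.reg .rsp - 40 := hA.rsp
  have c_rbx : v.reg .rbx = e.reg .rdi := hA.rbx
  have w_kept : RegsKept [.rsp] v v := RegsKept.refl _ _
  have w_eq : Mem.EqOn ProgX.Base.L.textLo ProgX.Base.L.textHi u₀.mem v.mem := ProgX.Base.conv_code_eqOn hA.code
  have hdf : v.flags .df = false := (show abiInv _ from hA.abi).1
  have hmx : v.mxcsr &&& 0x1F80 = 0x1F80 := (show abiInv _ from hA.abi).2
  have hsse : SseOK v := ProgX.Base.sseOK_of_abiInv hA.abi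
  have hinv := hA.inv
  have hbase : Hc.base = 0x800000 := hA.region.1.trans henv.heap.base
  obtain ⟨hcur1, hcur2, hcur3⟩ := henv.ctx.cursor_range hinv.shadow
  -- WHERE gif IS, as numbers (`Heap.Live.range`: no `% 16` clause comes into the context)
  have hglive : Hc.Live F.gif 120 := howns.live (F.gif, 120) List.mem_cons_self
  obtain ⟨wg1, wg2⟩ := hglive.range hbase hinv.heap
  -- the two cells' addresses, as the machine computes them
  have erdi : (e.reg .rdi + 80).toNat = F.gif + 80 := by u_omega
  have ersi : (e.reg .rdi + 88).toNat = F.gif + 88 := by u_omega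
  -- the three stack slots and the return address at the cut, the memory since the entry
  have k_r13 : v.mem.readLE (e.reg .rsp - 8) 8 = (e.reg .r13).toNat := hA.slot_r13
  have k_r12 : v.mem.readLE (e.reg .rsp - 16) 8 = (e.reg .r12).toNat := hA.slot_r12
  have k_rbp : v.mem.readLE (e.reg .rsp - 24) 8 = (e.reg .rbp).toNat := hA.slot_rbp
  have k_rbx : v.mem.readLE (e.reg .rsp - 32) 8 = (e.reg .rbx).toNat := hA.slot_rbx
  have k_ra : UInt64.ofNat (v.mem.readLE (e.reg .rsp) 8) = ret := hA.slot_ra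
  have hsame0 : Mem.SameExcept
      [⟨(e.reg .rsp).toNat - 160, (e.reg .rsp).toNat⟩,
       ⟨0x800000, 0x1000020⟩,
       ⟨(e.reg .rsi).toNat, (e.reg .rsi).toNat + 4⟩] e.mem v.mem := hA.same
  -- the instance of the callee's contract the walker applies at the call: the pending list, the holder gif
  have hfe := h_GifFreeExtensions Hc rest frames F.pend F.gif 120
  -- THE WALK: 0x109d06 `lea rsi, [rbx+0x58]`, 0x109d0a `lea rdi, [rbx+0x50]`, 0x109d0e `call GifFreeExtensions` (l.705)
  u_walk hcode [hμ.vendor] until [Gif.L.DGifCloseFile.at_109d13] span [ProgX.Base.L.textLo, ProgX.Base.L.textHi] side (v_side)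
  case call_inv =>
    v_inv
  case pre_109d0e =>
    -- 0x109d0e (l.705): the heap's precondition over the pushed return address (`HeapPre.at_push`), and the pair of cells
    refine ⟨HeapPre.at_push henv.heap hA.region hinv w_rsp w_mem (by u_omega), ?_⟩
    rw [w_rdi, w_rsi, erdi, ersi, w_mem]
    have hpend : ExtsAt F.pend (GifFileType.ExtensionBlocks v.mem F.gif) (GifFileType.ExtensionBlockCount v.mem F.gif) v.mem :=
      hshape.pend
    simp only [gfield] at hpend
    refine ⟨hglive, ⟨by omega, by omega⟩, ⟨by omega, by omega⟩, Or.inl (by omega), ?_, Gif.Spec.DGifCloseFile_4.seg4_owns_cells howns⟩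
    -- the list's shape: the push went to the stack, gif and the list's array lie in the heap's region
    apply Gif.Spec.DGifCloseFile_4.seg4_extsAt_push _ _ hpend (by u_omega) (by omega) (by omega)
    intro y hy
    have hamem : (y.arr, 24 * y.cap) ∈ (DGifCloseFile.noSaved F).owned :=
      Forest.mem_owned_pend (F := DGifCloseFile.noSaved F) (by
        show (y.arr, 24 * y.cap) ∈ Exts.objs F.pend
        rw [hy]
        exact List.mem_cons_self)
    have harg := (howns.live _ hamem).range hbase hinv.heap
    rw [hy] at hpend
    have hlen := hpend.2.2.1
    simp only at harg
    omega
  -- 0x109d13 (ret11 = the cut): GifFreeExtensions has returned: the heap is `Hc` with every object of the list freed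
  obtain ⟨hinv2, hblocks, hcount, ws, hws, hwin⟩ := w_post
  have e8 : (s_109d0e.reg .rsp).toNat + 8 = (e.reg .rsp).toNat - 40 := by
    rw [w_rsp_109d0e]
    u_omega
  have e48 : (s_109d0e.reg .rsp).toNat = (e.reg .rsp).toNat - 48 := by
    rw [w_rsp_109d0e]
    u_omega
  rw [e8] at hinv2
  rw [w_rsi_109d0e, ersi] at hblocks
  rw [w_rdi_109d0e, erdi] at hcount
  rw [w_rdi_109d0e, w_rsi_109d0e, erdi, ersi, e48] at hwin
  -- the push of the return address: one stack window below the clean stack's end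
  have hpush : Mem.SameExcept [⟨(e.reg .rsp).toNat - 48, (e.reg .rsp).toNat - 40⟩] v.mem s_109d0e.mem := by
    rw [w_mem_109d0e]
    u_same
  -- THE SHAPE AND THE MEASURE through the callee's fine footprint (a cell, or a gap of the heap: it misses gif's other fields, the
  -- private object, the cursor)
  obtain ⟨hshape2, hrem2⟩ := Gif.Spec.DGifCloseFile_4.seg4_shape (top := (e.reg .rsp).toNat - 40)
    (top' := (e.reg .rsp).toNat - 48) hshape hinv.heap hbase howns hcur2 hcur3 (by omega) (by omega) hpush (by simp only; omega)
    hws hwin hblocks hcount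
  -- the stack slots through the callee's `Returned.same` (its stack below the pushed return address, the heap's region, the shadow)
  v_after_call w_rsp_109d0e w_mem_109d0e
  have hsr13 : s_109d0er.mem.readLE (e.reg .rsp - 8) 8 = (e.reg .r13).toNat := by u_frame k_r13
  have hsr12 : s_109d0er.mem.readLE (e.reg .rsp - 16) 8 = (e.reg .r12).toNat := by u_frame k_r12
  have hsrbp : s_109d0er.mem.readLE (e.reg .rsp - 24) 8 = (e.reg .rbp).toNat := by u_frame k_rbp
  have hsrbx : s_109d0er.mem.readLE (e.reg .rsp - 32) 8 = (e.reg .rbx).toNat := by u_frame k_rbx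
  have hsra : UInt64.ofNat (s_109d0er.mem.readLE (e.reg .rsp) 8) = ret := by u_frame k_ra
  -- nothing was written but the function's stack and the contract's windows
  have hsame : Mem.SameExcept
      [⟨(e.reg .rsp).toNat - 160, (e.reg .rsp).toNat⟩,
       ⟨0x800000, 0x1000020⟩,
       ⟨(e.reg .rsi).toNat, (e.reg .rsi).toNat + 4⟩] e.mem s_109d0er.mem := by u_same
  exact ReachVia.done ⟨Hc.releaseAll ((Exts.objs F.pend).map Prod.fst), {
    at_ := {
      entry := hA.entry
      pre := hA.pre
      rip := w_rip
      rsp := w_rsp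
      rbx := (w_kept.get .rbx rfl).trans c_rbx
      rbp := (w_kept.get .rbp rfl).trans hA.rbp
      r14 := (w_kept.get .r14 rfl).trans hA.r14
      r15 := (w_kept.get .r15 rfl).trans hA.r15
      slot_r13 := hsr13
      slot_r12 := hsr12
      slot_rbp := hsrbp
      slot_rbx := hsrbx
      slot_ra := hsra
      inv := hinv2
      region := hA.region.trans (SameRegion.releaseAll Hc _)
      rem := hrem2.trans hA.rem
      same := hsame
      code := w_code
      abi := w_inv }
    shape := hshape2
    owns := Gif.Spec.DGifCloseFile_4.seg4_owns_bare howns }⟩
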